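-- pv_equiv track=rewrite | github.com/bssrdf/pyleet | LongestValleyInArray.py | longestValley
-- ===== SOURCE A (Python) =====
-- def longestValley(A):
--     """
--     :type A: List[int]
--     :rtype: int
--     """
--     if len(A) < 3: return 0
--     l, trough, r = 0, 0, 1
--     res, n = 0, len(A)
--     while r < n :
--         if A[r] < A[r-1]:
--             if l < trough < r-1:
--                 res = max(res, r-l)
--             if trough < r-1:
--                 l = r-1
--             trough = r
--         elif A[r] == A[r-1]:
--             if l < trough < r-1:
--                 res = max(res, r-l)
--             if trough <= r-1:
--                 l = r
--                 trough = l
--         r += 1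
--     if l < trough < r-1:
--         res = max(res, r-l)
--     return res
-- ===== SOURCE B (Python) =====
-- def longestValley(A):
--     def down(xs):
--         # out[i] = length of the strictly decreasing run ending at i
--         out = []
--         d = 0
--         prev = None
--         for x in xs:
--             d = d + 1 if prev is not None and x < prev else 0
--             out.append(d)
--             prev = x
--         return out
--     dec = down(A)
--     inc = down(A[::-1])[::-1]
--     res = 0
--     for d, u in zip(dec, inc):
--         if d > 0 and u > 0:
--             res = max(res, d + u + 1)
--     return res
-- ===== Notes on version B (the rewrite author's own statement) =====
-- stated objective: alternative
-- what changed: Replaces A's stateful one-pass pointer machine (l/trough/r with deferred res updates at run breaks and after the loop) by the standard two-auxiliary-array formulation: dec[i] = length of the strictly decreasing run ending at i, inc[i] = length of the strictly increasing run starting at i (computed as dec of the reversed list), and the answer is max over troughs i of dec[i]+inc[i]+1.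
import Mathlib
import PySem

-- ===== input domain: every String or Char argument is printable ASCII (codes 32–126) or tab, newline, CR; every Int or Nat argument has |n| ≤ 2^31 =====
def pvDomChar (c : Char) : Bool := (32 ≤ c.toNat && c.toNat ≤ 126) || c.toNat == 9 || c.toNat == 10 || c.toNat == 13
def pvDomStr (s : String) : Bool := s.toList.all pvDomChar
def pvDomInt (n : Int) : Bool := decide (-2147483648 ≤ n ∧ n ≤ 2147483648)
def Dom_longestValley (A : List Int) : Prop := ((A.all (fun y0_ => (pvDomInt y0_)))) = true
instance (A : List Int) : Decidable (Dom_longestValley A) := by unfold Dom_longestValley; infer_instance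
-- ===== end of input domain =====

-- Program-equivalence file: A's one-pass l/trough pointer machine vs B's dec/inc run-length arrays.
-- B is an alternative algorithm of the same O(n) cost; equivalence is proved for all inputs.


-- ===== PORT A =====
-- loop body of A's while-loop, verbatim (state = (l, trough, res), r the loop index)
def pvStepA (A : List Int) (st : Int × Int × Int) (r : Int) : Int × Int × Int :=
  let l := st.1; let trough := st.2.1; let res := st.2.2
  if PySem.List.pyGetD A r 0 < PySem.List.pyGetD A (r - 1) 0 then
    let res := if l < trough ∧ trough < r - 1 then max res (r - l) else res
    let l := if trough < r - 1 then r - 1 else l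
    (l, r, res)
  else if PySem.List.pyGetD A r 0 = PySem.List.pyGetD A (r - 1) 0 then
    let res := if l < trough ∧ trough < r - 1 then max res (r - l) else res
    if trough ≤ r - 1 then (r, r, res) else (l, trough, res)
  else (l, trough, res)

def longestValley (A : List Int) : Int :=
  if A.length < 3 then 0
  else
    let n : Int := A.length
    let st := (PySem.List.pyRange 1 n 1).foldl (pvStepA A) (0, 0, 0)
    let l := st.1; let trough := st.2.1; let res := st.2.2
    if l < trough ∧ trough < n - 1 then max res (n - l) else res

-- ===== PORT B =====
-- helper `down` of Source B: fold over xs carrying (out, d, prev)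
def pvDown (xs : List Int) : List Int :=
  (xs.foldl (fun (st : List Int × Int × Option Int) x =>
      let d := match st.2.2 with
        | some p => if x < p then st.2.1 + 1 else 0
        | none => 0
      (st.1 ++ [d], d, some x)) ([], 0, none)).1

def longestValley_alt (A : List Int) : Int :=
  let dec := pvDown A
  let inc := (pvDown A.reverse).reverse   -- A[::-1] is List.reverse (PySem.List.slice?_none_none_neg_one)
  (dec.zip inc).foldl
    (fun res du => if 0 < du.1 ∧ 0 < du.2 then max res (du.1 + du.2 + 1) else res) 0

-- ===== PRECONDITION & SPEC =====
def Spec_longestValley (A : List Int) (out : Int) : Prop := out = longestValley_alt A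
instance (A : List Int) (out : Int) : Decidable (Spec_longestValley A out) := by unfold Spec_longestValley; infer_instance

-- ===== CLAIM (what is proved, stated in full; the proofs are below) =====
def Claim_equal_longestValley : Prop := ∀ (A : List Int), Dom_longestValley A → Spec_longestValley A (longestValley A)

-- ===== LEMMAS AND PROOFS =====

-- mathematical index functions
def gA (A : List Int) (i : ℕ) : Int := A.getD i 0

def decF (A : List Int) : ℕ → ℕ
  | 0 => 0
  | (i+1) => if gA A (i+1) < gA A i then decF A i + 1 else 0

def incE (A : List Int) : ℕ → ℕ
  | 0 => 0
  | (i+1) => if gA A i < gA A (i+1) then incE A i + 1 else 0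

def incS (A : List Int) (i : ℕ) : ℕ :=
  if h : i + 1 < A.length ∧ gA A i < gA A (i+1) then incS A (i+1) + 1 else 0
termination_by A.length - i
decreasing_by omega

def VV (A : List Int) (i : ℕ) : ℕ := decF A i + incS A i + 1

def MaxV (A : List Int) (r : ℕ) : ℕ :=
  (Finset.range A.length).sup
    (fun i => if 0 < decF A i ∧ 0 < incS A i ∧ i + incS A i + 2 ≤ r then VV A i else 0)

-- A-side abbreviations for the invariant
def tI (A : List Int) (r : ℕ) : ℕ := (r - 1) - incE A (r - 1)
def lI (A : List Int) (r : ℕ) : ℕ := tI A r - decF A (tI A r)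

-- ===== basic bounds =====
lemma decF_le (A : List Int) (i : ℕ) : decF A i ≤ i := by
  induction i with
  | zero => simp [decF]
  | succ i ih => simp only [decF]; split <;> omega

lemma incE_le (A : List Int) (i : ℕ) : incE A i ≤ i := by
  induction i with
  | zero => simp [incE]
  | succ i ih => simp only [incE]; split <;> omega

lemma incS_le (A : List Int) (i : ℕ) (h : i < A.length) : i + incS A i ≤ A.length - 1 := by
  have H : ∀ d i, A.length - i = d → i < A.length → i + incS A i ≤ A.length - 1 := by
    intro d
    induction d with
    | zero => intro i h1 h2; exact absurd h1 (by omega)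
    | succ d ih =>
      intro i h1 h2
      rw [incS]
      split
      · next hc => have := ih (i+1) (by omega) hc.1; omega
      · omega
  exact H _ i rfl h

lemma incS_pos_iff (A : List Int) (i : ℕ) :
    0 < incS A i ↔ i + 1 < A.length ∧ gA A i < gA A (i+1) := by
  rw [incS]; split <;> simp_all

lemma incS_eq_zero (A : List Int) (i : ℕ)
    (h : ¬ (i + 1 < A.length ∧ gA A i < gA A (i+1))) : incS A i = 0 := by
  rw [incS]; simp [h]

lemma incS_succ (A : List Int) (i : ℕ) (h : i + 1 < A.length) (hg : gA A i < gA A (i+1)) :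
    incS A i = incS A (i+1) + 1 := by
  rw [incS]; simp [h, hg]

-- along an increasing run, incS decreases by one per step
lemma incS_sub (A : List Int) (i k : ℕ) (hk : k ≤ incS A i) :
    incS A (i + k) = incS A i - k := by
  induction k generalizing i with
  | zero => simp
  | succ k ih =>
    have hpos : 0 < incS A i := by omega
    rw [incS_pos_iff] at hpos
    have hs := incS_succ A i hpos.1 hpos.2
    have h1 : i + (k + 1) = (i + 1) + k := by omega
    rw [h1, ih (i+1) (by omega)]
    omega

-- along an increasing run, incE grows by one per step
lemma incE_run (A : List Int) (i k : ℕ) (hk : k ≤ incS A i) :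
    incE A (i + k) = k + incE A i := by
  induction k with
  | zero => simp
  | succ k ih =>
    have h1 : 0 < incS A (i + k) := by
      rw [incS_sub A i k (by omega)]; omega
    rw [incS_pos_iff] at h1
    have h2 : i + (k + 1) = (i + k) + 1 := by omega
    rw [h2]
    simp only [incE, if_pos h1.2]
    rw [ih (by omega)]
    omega

-- walking back from j through its whole increasing run: incS at the run start
lemma incS_back (A : List Int) (j k : ℕ) (hj : j < A.length) (hk : k ≤ incE A j) :
    incS A (j - k) = k + incS A j := by
  induction k generalizing j with
  | zero => simp
  | succ k ih =>
    match j with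
    | 0 => simp [incE] at hk
    | j' + 1 =>
      simp only [incE] at hk
      split at hk
      · next hlt =>
        have ih' := ih j' (by omega) (by omega)
        have h1 : j' + 1 - (k + 1) = j' - k := by omega
        rw [h1, ih', incS_succ A j' hj hlt]
        omega
      · omega

-- ===== characterisation of pvDown =====
lemma gA_append (xs ys : List Int) (i : ℕ) (h : i < xs.length) : gA (xs ++ ys) i = gA xs i :=
  List.getD_append xs ys 0 i h

lemma decF_append (xs ys : List Int) (i : ℕ) (h : i < xs.length) :
    decF (xs ++ ys) i = decF xs i := by
  induction i with
  | zero => simp [decF]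
  | succ i ih =>
    simp only [decF]
    rw [gA_append _ _ (i+1) h, gA_append _ _ i (by omega), ih (by omega)]

lemma pvDown_state (xs : List Int) :
    xs.foldl (fun (st : List Int × Int × Option Int) x =>
      let d := match st.2.2 with
        | some p => if x < p then st.2.1 + 1 else 0
        | none => 0
      (st.1 ++ [d], d, some x)) ([], 0, none)
    = ((List.range xs.length).map (fun i => (decF xs i : ℤ)),
       (if xs.length = 0 then 0 else (decF xs (xs.length - 1) : ℤ)), xs.getLast?) := by
  induction xs using List.reverseRecOn with
  | nil => simp
  | append_singleton ys x ih =>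
    rw [List.foldl_append, ih]
    rcases eq_or_ne ys [] with rfl | hne
    · simp [decF]
    · have hlen : 0 < ys.length := List.length_pos_of_ne_nil hne
      have hlast : ys.getLast? = some (ys.getLast hne) := List.getLast?_eq_some_getLast hne
      have hglast : gA ys (ys.length - 1) = ys.getLast hne := by
        unfold gA
        rw [List.getD_eq_getElem?_getD, List.getLast_eq_getElem,
          List.getElem?_eq_getElem (by omega)]
        rfl
      have hd : (if x < ys.getLast hne then (decF ys (ys.length - 1) : ℤ) + 1 else 0)
          = (decF (ys ++ [x]) ys.length : ℤ) := by
        have h1 : ys.length = (ys.length - 1) + 1 := by omega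
        rw [h1, decF]
        rw [← h1]
        have h2 : gA (ys ++ [x]) ys.length = x := by simp [gA]
        have h3 : gA (ys ++ [x]) (ys.length - 1) = gA ys (ys.length - 1) :=
          gA_append _ _ _ (by omega)
        rw [h2, h3, hglast, decF_append _ _ _ (by omega)]
        split
        · push_cast
          ring
        · push_cast
      have hmap : (List.range (ys ++ [x]).length).map (fun i => (decF (ys ++ [x]) i : ℤ))
          = (List.range ys.length).map (fun i => (decF ys i : ℤ))
            ++ [(decF (ys ++ [x]) ys.length : ℤ)] := by
        rw [List.length_append, List.length_singleton, List.range_succ, List.map_append,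
          List.map_singleton]
        congr 1
        refine List.map_congr_left fun i hi => ?_
        rw [decF_append _ _ _ (List.mem_range.mp hi)]
      have hys0 : ¬ ys.length = 0 := by omega
      have hys1 : ¬ (ys ++ [x]).length = 0 := by simp
      have hlen1 : (ys ++ [x]).length - 1 = ys.length := by simp
      simp only [hlast, List.foldl_cons, List.foldl_nil, if_neg hys0, if_neg hys1,
        hmap, hlen1, List.getLast?_concat, ← hd]

lemma pvDown_eq (xs : List Int) :
    pvDown xs = (List.range xs.length).map (fun i => (decF xs i : ℤ)) := by
  unfold pvDown
  rw [pvDown_state]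

-- reverse transfer: decF of the reverse computes incS
lemma gA_reverse (A : List Int) (j : ℕ) (h : j < A.length) :
    gA A.reverse j = gA A (A.length - 1 - j) := by
  unfold gA
  rw [List.getD_eq_getElem?_getD, List.getD_eq_getElem?_getD, List.getElem?_reverse h]

lemma decF_reverse (A : List Int) (j : ℕ) (h : j < A.length) :
    decF A.reverse j = incS A (A.length - 1 - j) := by
  induction j with
  | zero =>
    simp only [Nat.sub_zero, decF]
    rw [incS_eq_zero A _ (by omega)]
  | succ j ih =>
    have hj : j < A.length := by omega
    simp only [decF]
    rw [gA_reverse A (j+1) h, gA_reverse A j hj, ih hj]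
    have hi1 : A.length - 1 - j = (A.length - 1 - (j+1)) + 1 := by omega
    rw [hi1]
    conv_rhs => rw [incS]
    split
    · next hc => rw [dif_pos ⟨by omega, hc⟩]
    · next hc => rw [dif_neg (fun hcon => hc hcon.2)]

-- ===== B's fold = MaxV (n+1) =====
lemma foldl_if_max_sup (n : ℕ) (p : ℕ → Prop) [DecidablePred p] (v : ℕ → ℕ) (a : ℕ) :
    (List.range n).foldl (fun (m : ℤ) i => if p i then max m ((v i : ℕ) : ℤ) else m) ((a : ℕ) : ℤ)
      = ((max a ((Finset.range n).sup fun i => if p i then v i else 0) : ℕ) : ℤ) := by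
  induction n with
  | zero => simp
  | succ n ih =>
    rw [List.range_succ, List.foldl_append, ih, Finset.range_add_one, Finset.sup_insert]
    simp only [List.foldl_cons, List.foldl_nil]
    split
    · next hp =>
      rw [Nat.cast_max, Nat.cast_max, Nat.cast_max]
      omega
    · next hp => simp

lemma inc_eq (A : List Int) :
    (pvDown A.reverse).reverse = (List.range A.length).map (fun i => (incS A i : ℤ)) := by
  rw [pvDown_eq, List.length_reverse]
  apply List.ext_getElem (by simp)
  intro i h1 h2
  simp only [List.length_map, List.length_range] at h2
  rw [List.getElem_reverse, List.getElem_map, List.getElem_map, List.getElem_range,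
    List.getElem_range]
  simp only [List.length_map, List.length_range]
  rw [decF_reverse A _ (by omega)]
  congr 2
  omega

lemma alt_eq_MaxV (A : List Int) :
    longestValley_alt A = (MaxV A (A.length + 1) : ℤ) := by
  unfold longestValley_alt
  dsimp only
  rw [pvDown_eq, inc_eq, List.zip_map', List.foldl_map]
  have hfun : (fun (res : ℤ) (i : ℕ) =>
        if 0 < ((decF A i : ℕ) : ℤ) ∧ 0 < ((incS A i : ℕ) : ℤ)
        then max res (((decF A i : ℕ) : ℤ) + ((incS A i : ℕ) : ℤ) + 1) else res)
      = (fun (m : ℤ) (i : ℕ) =>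
        if 0 < decF A i ∧ 0 < incS A i then max m ((VV A i : ℕ) : ℤ) else m) := by
    funext m i
    have hv : ((VV A i : ℕ) : ℤ) = ((decF A i : ℕ) : ℤ) + ((incS A i : ℕ) : ℤ) + 1 := by
      push_cast [VV]; ring
    rw [hv]
    simp [Int.natCast_pos]
  rw [hfun]
  rw [show (0 : ℤ) = ((0 : ℕ) : ℤ) from rfl,
    foldl_if_max_sup A.length (fun i => 0 < decF A i ∧ 0 < incS A i) (VV A) 0]
  rw [Nat.zero_max]
  unfold MaxV
  congr 1
  refine Finset.sup_congr rfl fun i hi => ?_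
  have hle := incS_le A i (Finset.mem_range.mp hi)
  refine if_congr ?_ rfl rfl
  constructor
  · rintro ⟨h1, h2⟩; exact ⟨h1, h2, by omega⟩
  · rintro ⟨h1, h2, _⟩; exact ⟨h1, h2⟩

-- ===== MaxV transitions =====
-- no trough's increasing run ends at r-1  ⇒  MaxV unchanged
-- a trough whose increasing run ends at j determines incE at j
lemma closer_eq (A : List Int) (i j : ℕ) (hd : 0 < decF A i) (hs : 0 < incS A i)
    (hsum : i + incS A i = j) : incE A j = incS A i := by
  have hi0 : incE A i = 0 := by
    match i, hd with
    | 0, hd => simp [decF] at hd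
    | i' + 1, hd =>
      simp only [decF] at hd
      split at hd
      · next hg => simp only [incE]; rw [if_neg (asymm hg)]
      · omega
  have h2 := incE_run A i (incS A i) le_rfl
  rw [hsum] at h2
  omega

lemma MaxV_succ_of_no_close (A : List Int) (r : ℕ)
    (h : ∀ i, 0 < decF A i → 0 < incS A i → i + incS A i + 2 ≠ r + 1) :
    MaxV A (r + 1) = MaxV A r := by
  unfold MaxV
  refine Finset.sup_congr rfl fun i _ => if_congr ⟨?_, ?_⟩ rfl rfl
  · rintro ⟨h1, h2, h3⟩
    exact ⟨h1, h2, by have := h i h1 h2; omega⟩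
  · rintro ⟨h1, h2, h3⟩
    exact ⟨h1, h2, by omega⟩

-- the run ending at j := r-1 breaks at r (or the array ends): MaxV picks up the pending valley
lemma MaxV_succ_close (A : List Int) (r : ℕ) (hr : 1 ≤ r) (hrn : r ≤ A.length)
    (hbreak : r = A.length ∨ ¬ gA A (r-1) < gA A r) :
    MaxV A (r + 1) =
      if 0 < decF A (tI A r) ∧ 0 < incE A (r-1) then
        max (MaxV A r) (VV A (tI A r)) else MaxV A r := by
  have hj1 : r - 1 + 1 = r := by omega
  have hjn : r - 1 < A.length := by omega
  have hSj : incS A (r - 1) = 0 := by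
    refine incS_eq_zero A _ ?_
    rw [hj1]
    rintro ⟨hlt, hg⟩
    rcases hbreak with h | h
    · omega
    · exact h hg
  have hSt : incS A (tI A r) = incE A (r - 1) := by
    unfold tI
    rw [incS_back A (r-1) (incE A (r-1)) hjn le_rfl, hSj]
    omega
  have hEle : incE A (r - 1) ≤ r - 1 := incE_le A _
  have htle : tI A r ≤ r - 1 := by unfold tI; omega
  split
  · next hpos =>
    obtain ⟨hdt, het⟩ := hpos
    apply le_antisymm
    · apply Finset.sup_le
      intro i hi
      split
      · next hci =>
        obtain ⟨h1, h2, h3⟩ := hci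
        by_cases hcl : i + incS A i + 2 ≤ r
        · refine le_max_of_le_left ?_
          have hs := Finset.le_sup (f := fun i =>
            if 0 < decF A i ∧ 0 < incS A i ∧ i + incS A i + 2 ≤ r then VV A i else 0) hi
          simp only [] at hs
          rw [if_pos ⟨h1, h2, hcl⟩] at hs
          exact hs
        · have hsum : i + incS A i = r - 1 := by omega
          have hiq := closer_eq A i (r-1) h1 h2 hsum
          have hit : i = tI A r := by unfold tI; omega
          rw [hit]
          exact le_max_right _ _
      · exact Nat.zero_le _
    · apply max_le
      · apply Finset.sup_le
        intro i hi
        split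
        · next hci =>
          refine Finset.le_sup_of_le hi (le_of_eq ?_)
          rw [if_pos ⟨hci.1, hci.2.1, by omega⟩]
        · exact Nat.zero_le _
      · refine Finset.le_sup_of_le (Finset.mem_range.mpr (by omega : tI A r < A.length))
          (le_of_eq ?_)
        rw [if_pos ⟨hdt, by have h' := hSt; unfold tI at h' ⊢; omega,
          by have h' := hSt; unfold tI at h' ⊢; omega⟩]
  · next hneg =>
    refine Finset.sup_congr rfl fun i _ => if_congr ⟨?_, ?_⟩ rfl rfl
    · rintro ⟨h1, h2, h3⟩
      refine ⟨h1, h2, ?_⟩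
      by_contra hcl
      have hsum : i + incS A i = r - 1 := by omega
      have hiq := closer_eq A i (r-1) h1 h2 hsum
      have hit : i = tI A r := by unfold tI; omega
      exact hneg ⟨by rw [← hit]; exact h1, by omega⟩
    · rintro ⟨h1, h2, h3⟩
      exact ⟨h1, h2, by omega⟩

lemma decF_zero_of_incE_pos (A : List Int) (m : ℕ) (h : 0 < incE A m) : decF A m = 0 := by
  match m, h with
  | 0, h => simp [incE] at h
  | m' + 1, h =>
    simp only [incE] at h
    split at h
    · next hg => simp only [decF]; rw [if_neg (asymm hg)]
    · omega

-- ===== the main loop invariant =====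
lemma loopInv (A : List Int) (m : ℕ) (hm : m + 1 ≤ A.length) :
    ((List.range m).map (fun k => (1 : ℤ) + (k : ℕ))).foldl (pvStepA A) (0, 0, 0)
      = ((lI A (m+1) : ℤ), (tI A (m+1) : ℤ), (MaxV A (m+1) : ℤ)) := by
  induction m with
  | zero =>
    have h1 : tI A 1 = 0 := by simp [tI, incE]
    have h2 : lI A 1 = 0 := by simp [lI, h1, decF]
    have h3 : MaxV A 1 = 0 := by
      refine Nat.le_zero.mp (Finset.sup_le fun i _ => ?_)
      rw [if_neg]
      rintro ⟨_, _, h⟩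
      omega
    simp [h1, h2, h3]
  | succ m ih =>
    have hm' : m + 1 ≤ A.length := by omega
    have hnm : m < A.length := by omega
    rw [List.range_succ, List.map_append, List.foldl_append, ih hm']
    simp only [List.map_cons, List.map_nil, List.foldl_cons, List.foldl_nil]
    unfold pvStepA
    dsimp only
    have e2 : (1 : ℤ) + (m : ℕ) - 1 = ((m : ℕ) : ℤ) := by omega
    have e1 : (1 : ℤ) + (m : ℕ) = ((m + 1 : ℕ) : ℤ) := by push_cast; ring
    rw [e2, e1, PySem.List.pyGetD_natCast, PySem.List.pyGetD_natCast]
    -- facts about the current state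
    have hE : incE A m ≤ m := incE_le A m
    have htm : tI A (m+1) = m - incE A m := by simp [tI]
    have hD : decF A (tI A (m+1)) ≤ tI A (m+1) := decF_le A _
    have hlm : lI A (m+1) = tI A (m+1) - decF A (tI A (m+1)) := rfl
    have htle : tI A (m+1) ≤ m := by omega
    rcases lt_trichotomy (A.getD (m+1) 0) (A.getD m 0) with hlt | heq | hgt
    · -- strictly decreasing step
      have hlt' : gA A (m+1) < gA A m := hlt
      rw [if_pos hlt]
      have hE1 : incE A (m+1) = 0 := by
        simp only [incE]; rw [if_neg (asymm hlt')]
      have hd1 : decF A (m+1) = decF A m + 1 := by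
        simp only [decF]; rw [if_pos hlt']
      have htm2 : tI A (m+2) = m + 1 := by simp [tI, hE1]
      have hlm2 : lI A (m+2) = m - decF A m := by
        simp only [lI, htm2, hd1]
        omega
      have hSm : incS A m = 0 := incS_eq_zero A m (fun hc => absurd hc.2 (asymm hlt'))
      have hSt : incS A (tI A (m+1)) = incE A m := by
        rw [htm, incS_back A m (incE A m) hnm le_rfl, hSm]
        omega
      have hMx : MaxV A (m+2) =
          if 0 < decF A (tI A (m+1)) ∧ 0 < incE A m then
            max (MaxV A (m+1)) (VV A (tI A (m+1))) else MaxV A (m+1) := by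
        have := MaxV_succ_close A (m+1) (by omega) (by omega) (Or.inr (asymm hlt'))
        simpa using this
      have hcond : ((lI A (m+1) : ℤ) < (tI A (m+1) : ℤ) ∧ (tI A (m+1) : ℤ) < ((m : ℕ) : ℤ))
          ↔ (0 < decF A (tI A (m+1)) ∧ 0 < incE A m) := by
        rw [Nat.cast_lt, Nat.cast_lt]
        constructor
        · rintro ⟨a, b⟩; exact ⟨by omega, by omega⟩
        · rintro ⟨a, b⟩; exact ⟨by omega, by omega⟩
      refine Prod.ext ?_ (Prod.ext ?_ ?_)
      · -- l component
        dsimp only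
        rw [htm2] at *
        split_ifs with h
        · have hEpos : 0 < incE A m := by
            rw [Nat.cast_lt] at h; omega
          have hd0 : decF A m = 0 := decF_zero_of_incE_pos A m hEpos
          rw [hlm2, hd0]
          omega
        · have hE0 : incE A m = 0 := by
            rw [Nat.cast_lt] at h; omega
          rw [hlm2, hlm, htm, hE0]
          simp
      · dsimp only
        rw [htm2]
      · dsimp only
        rw [hMx, if_congr hcond rfl rfl]
        split_ifs with h
        · rw [Nat.cast_max]
          congr 1
          have hVV : VV A (tI A (m+1)) = m + 1 - lI A (m+1) := by
            unfold VV
            rw [hSt]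
            omega
          rw [hVV]
          omega
        · rfl
    · -- equal step
      have heq' : gA A (m+1) = gA A m := heq
      rw [if_neg (by rw [heq]; exact lt_irrefl _), if_pos heq]
      have hE1 : incE A (m+1) = 0 := by
        simp only [incE]; rw [if_neg (by rw [heq']; exact lt_irrefl _)]
      have hd1 : decF A (m+1) = 0 := by
        simp only [decF]; rw [if_neg (by rw [heq']; exact lt_irrefl _)]
      have htm2 : tI A (m+2) = m + 1 := by simp [tI, hE1]
      have hlm2 : lI A (m+2) = m + 1 := by simp [lI, htm2, hd1]
      have hSm : incS A m = 0 :=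
        incS_eq_zero A m (fun hc => absurd hc.2 (by rw [heq']; exact lt_irrefl _))
      have hSt : incS A (tI A (m+1)) = incE A m := by
        rw [htm, incS_back A m (incE A m) hnm le_rfl, hSm]
        omega
      have hMx : MaxV A (m+2) =
          if 0 < decF A (tI A (m+1)) ∧ 0 < incE A m then
            max (MaxV A (m+1)) (VV A (tI A (m+1))) else MaxV A (m+1) := by
        have := MaxV_succ_close A (m+1) (by omega) (by omega)
          (Or.inr (by rw [heq']; exact lt_irrefl _))
        simpa using this
      have hcond : ((lI A (m+1) : ℤ) < (tI A (m+1) : ℤ) ∧ (tI A (m+1) : ℤ) < ((m : ℕ) : ℤ))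
          ↔ (0 < decF A (tI A (m+1)) ∧ 0 < incE A m) := by
        rw [Nat.cast_lt, Nat.cast_lt]
        constructor
        · rintro ⟨a, b⟩; exact ⟨by omega, by omega⟩
        · rintro ⟨a, b⟩; exact ⟨by omega, by omega⟩
      rw [if_pos (show (tI A (m+1) : ℤ) ≤ ((m : ℕ) : ℤ) from by rw [Nat.cast_le]; omega)]
      refine Prod.ext ?_ (Prod.ext ?_ ?_)
      · dsimp only
        rw [hlm2]
      · dsimp only
        rw [htm2]
      · dsimp only
        rw [hMx, if_congr hcond rfl rfl]
        split_ifs with h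
        · rw [Nat.cast_max]
          congr 1
          have hVV : VV A (tI A (m+1)) = m + 1 - lI A (m+1) := by
            unfold VV
            rw [hSt]
            omega
          rw [hVV]
          omega
        · rfl
    · -- strictly increasing step
      have hgt' : gA A m < gA A (m+1) := hgt
      rw [if_neg (asymm hgt), if_neg (ne_of_gt hgt)]
      have hE1 : incE A (m+1) = incE A m + 1 := by
        simp only [incE]; rw [if_pos hgt']
      have htm2 : tI A (m+2) = tI A (m+1) := by
        unfold tI
        rw [show m + 2 - 1 = m + 1 from by omega, show m + 1 - 1 = m from by omega, hE1]
        omega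
      have hMx : MaxV A (m+2) = MaxV A (m+1) := by
        apply MaxV_succ_of_no_close
        intro i h1 h2 h3
        have hsum : i + incS A i = m := by omega
        have h0 : incS A (i + incS A i) = 0 := by
          rw [incS_sub A i (incS A i) le_rfl]; omega
        rw [hsum] at h0
        have : 0 < incS A m := by
          rw [incS_pos_iff]; exact ⟨by omega, hgt'⟩
        omega
      rw [show lI A (m+1+1) = lI A (m+1) from by simp only [lI]; rw [htm2], htm2, hMx]

-- ===== VERDICT (by name: the statement is the Claim_ definition above) =====
theorem longestValley_spec : Claim_equal_longestValley := by
  intro A _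
  unfold Spec_longestValley
  by_cases h3 : A.length < 3
  · unfold longestValley
    rw [if_pos h3, alt_eq_MaxV]
    have h0 : MaxV A (A.length + 1) = 0 := by
      refine Nat.le_zero.mp (Finset.sup_le fun i hi => ?_)
      rw [if_neg]
      rintro ⟨h1, h2, _⟩
      have hi' := Finset.mem_range.mp hi
      have hd := decF_le A i
      rw [incS_pos_iff] at h2
      omega
    rw [h0]
    rfl
  · unfold longestValley
    rw [if_neg h3]
    dsimp only
    rw [PySem.List.pyRange_one 1 (A.length : ℤ),
      show ((A.length : ℤ) - 1).toNat = A.length - 1 from by omega,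
      loopInv A (A.length - 1) (by omega),
      show A.length - 1 + 1 = A.length from by omega,
      alt_eq_MaxV]
    have hE : incE A (A.length - 1) ≤ A.length - 1 := incE_le A _
    have htm : tI A A.length = (A.length - 1) - incE A (A.length - 1) := rfl
    have hlm : lI A A.length = tI A A.length - decF A (tI A A.length) := rfl
    have hD : decF A (tI A A.length) ≤ tI A A.length := decF_le A _
    have hSn1 : incS A (A.length - 1) = 0 :=
      incS_eq_zero A _ (fun hc => by omega)
    have hSt : incS A (tI A A.length) = incE A (A.length - 1) := by
      rw [htm, incS_back A (A.length - 1) _ (by omega) le_rfl, hSn1]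
      omega
    have hM := MaxV_succ_close A A.length (by omega) le_rfl (Or.inl rfl)
    rw [hM, apply_ite (fun x : ℕ => (x : ℤ))]
    have hcond : ((lI A A.length : ℤ) < (tI A A.length : ℤ)
          ∧ (tI A A.length : ℤ) < (A.length : ℤ) - 1)
        ↔ (0 < decF A (tI A A.length) ∧ 0 < incE A (A.length - 1)) := by
      constructor
      · rintro ⟨a, b⟩; exact ⟨by omega, by omega⟩
      · rintro ⟨a, b⟩; exact ⟨by omega, by omega⟩
    rw [if_congr hcond rfl rfl]
    split_ifs with h
    · rw [Nat.cast_max]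
      congr 1
      have hVV : VV A (tI A A.length) = A.length - lI A A.length := by
        unfold VV
        rw [hSt]
        omega
      rw [hVV]
      omega
    · rfl
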